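-- pv_equiv track=rewrite | github.com/openmpy/ps | Python3/프로그래머스/1/135808. 과일 장수/과일 장수.py | solution
-- ===== SOURCE A (Python) =====
-- def solution(k, m, score):
--     score = list(sorted(score))
--     answer = 0
--
--     while len(score) >= m:
--         arr = []
--
--         for _ in range(m):
--             arr.append(score.pop())
--
--         answer += min(arr) * len(arr)
--
--     return answer
-- ===== SOURCE B (Python) =====
-- def solution(k, m, score):
--     s = sorted(score)
--     n = len(s)
--     return sum(s[i] * m for i in range(n % m, n, m))
-- ===== Notes on version B (the rewrite author's own statement) =====
-- stated objective: simpler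
-- what changed: Replaces A's while-loop that pops m items at a time into a temporary list and takes its min by a single strided sum over the ascending sort: group minimums sit at indices n%m, n%m+m, ..., n-m, so B is one comprehension with no temporary list and no quadratic pop-from-front behaviour.
-- outside the precondition, e.g. on solution(0, 0, [1, 2]): A raises ValueError, B raises ZeroDivisionError; on solution(0, -1, [1, 2]): A raises ValueError, B returns 0
import Mathlib
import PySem

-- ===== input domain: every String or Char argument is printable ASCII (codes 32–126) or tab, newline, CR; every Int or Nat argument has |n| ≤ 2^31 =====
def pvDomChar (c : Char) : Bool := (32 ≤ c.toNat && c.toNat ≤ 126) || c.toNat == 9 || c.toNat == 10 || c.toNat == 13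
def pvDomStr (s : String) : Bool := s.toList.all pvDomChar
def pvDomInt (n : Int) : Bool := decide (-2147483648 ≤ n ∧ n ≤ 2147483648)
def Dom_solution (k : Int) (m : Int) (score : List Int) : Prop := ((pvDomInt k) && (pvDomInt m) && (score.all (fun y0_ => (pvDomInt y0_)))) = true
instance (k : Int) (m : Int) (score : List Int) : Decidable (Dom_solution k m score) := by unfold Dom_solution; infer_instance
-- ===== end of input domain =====

-- B replaces A's while/pop grouping loop by one strided sum over the ascending sort
-- (group minimums sit at indices n%m, n%m+m, …, n-m); objective: simpler.

-- ===== PORT A =====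
-- while len(score) >= m: arr = []; for _ in range(m): arr.append(score.pop()); answer += min(arr)*len(arr)
-- fuel = initial length + 1 bounds the iterations (each pass removes m ≥ 1 items); for m ≤ 0 Python
-- raises ValueError at min([]) — those inputs are outside Pre_solution.
def solutionLoop : Nat → Int → List Int → Int → Int
  | 0, _, _, answer => answer
  | fuel + 1, m, score, answer =>
    if m ≤ (score.length : Int) then
      let st := (PySem.List.pyRange 0 m 1).foldl
        (fun (st : List Int × List Int) _ =>
          match PySem.List.pop? st.1 with
          | none => st            -- Python: IndexError on pop from empty; unreachable when m ≥ 1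
          | some (x, rest) => (rest, st.2 ++ [x])) (score, [])
      solutionLoop fuel m st.1
        (answer + ((PySem.List.min? st.2 (fun x => x)).getD 0) * (st.2.length : Int))
    else answer

def solution (k : Int) (m : Int) (score : List Int) : Int :=
  solutionLoop (score.length + 1) m (PySem.List.sorted score (fun x => x)) 0

-- ===== PORT B =====
-- s = sorted(score); n = len(s); return sum(s[i] * m for i in range(n % m, n, m))
-- pyGet?.getD 0: every generated index satisfies 0 ≤ i < n, where pyGet? is exactly s[i].
def solution_alt (k : Int) (m : Int) (score : List Int) : Int :=
  let s := PySem.List.sorted score (fun x => x)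
  let n : Int := (s.length : Int)
  (PySem.List.pyRange (PySem.Int.mod n m) n m).foldl
    (fun acc i => acc + (PySem.List.pyGet? s i).getD 0 * m) 0

-- ===== PRECONDITION & SPEC =====
-- A raises ValueError (min of empty arr) on every input with m ≤ 0, so Pre_ is exactly m ≥ 1.
def Pre_solution (k : Int) (m : Int) (score : List Int) : Prop := 1 ≤ m
instance (k : Int) (m : Int) (score : List Int) : Decidable (Pre_solution k m score) := by unfold Pre_solution; infer_instance
def pvWitness_solution : Int × Int × List Int := (0, 3, [4, 1, 2, 5, 2])

def Spec_solution (k : Int) (m : Int) (score : List Int) (out : Int) : Prop := out = solution_alt k m score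
instance (k : Int) (m : Int) (score : List Int) (out : Int) : Decidable (Spec_solution k m score out) := by unfold Spec_solution; infer_instance

-- ===== CLAIM (what is proved, stated in full; the proofs are below) =====
def Claim_equal_solution : Prop := ∀ (k : Int) (m : Int) (score : List Int), Dom_solution k m score → Pre_solution k m score → Spec_solution k m score (solution k m score)

-- ===== LEMMAS AND PROOFS =====

-- B's total, as a sum (foldl_add's right-hand side), for a list s of length n.
def bsum (m : Int) (s : List Int) : Int :=
  ((PySem.List.pyRange (PySem.Int.mod (s.length : Int) m) (s.length : Int) m).map
    (fun i => (PySem.List.pyGet? s i).getD 0 * m)).sum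

-- the inner for-loop pops the last t elements in order
lemma innerFold (t : Nat) :
    ∀ (s arr : List Int), t ≤ s.length →
    (PySem.List.pyRange 0 (t : Int) 1).foldl
      (fun (st : List Int × List Int) _ =>
        match PySem.List.pop? st.1 with
        | none => st
        | some (x, rest) => (rest, st.2 ++ [x])) (s, arr)
      = (s.take (s.length - t), arr ++ (s.drop (s.length - t)).reverse) := by
  induction t with
  | zero =>
    intro s arr _
    simp [PySem.List.pyRange_one_eq_nil]
  | succ t ih =>
    intro s arr ht
    have h1 : ((t + 1 : Nat) : Int) = (t : Int) + 1 := by push_cast; ring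
    rw [h1, PySem.List.pyRange_one_succ_right (by positivity), List.foldl_append,
        ih s arr (by omega)]
    have hlt : s.length - t - 1 < s.length := by omega
    have htake : s.take (s.length - t) = s.take (s.length - t - 1) ++ [s[s.length - t - 1]] := by
      have h2 := List.take_add_one (l := s) (i := s.length - t - 1)
      rw [show s.length - t - 1 + 1 = s.length - t by omega] at h2
      simp [h2, List.getElem?_eq_getElem hlt]
    have hdrop : s.drop (s.length - t - 1) = s[s.length - t - 1] :: s.drop (s.length - t) := by
      have h3 := List.drop_eq_getElem_cons hlt
      rw [show s.length - t - 1 + 1 = s.length - t by omega] at h3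
      exact h3
    simp only [List.foldl_cons, List.foldl_nil, htake, PySem.List.pop?_last]
    rw [show s.length - (t + 1) = s.length - t - 1 by omega, hdrop]
    simp [List.append_assoc]

-- min of the (reversed) tail of an ascending list is its first element
lemma min_drop_reverse (s : List Int) (j : Nat) (hs : s.Pairwise (· ≤ ·)) (hj : j < s.length) :
    PySem.List.min? ((s.drop j).reverse) (fun x => x) = some s[j] := by
  have hdrop : s.drop j = s[j] :: s.drop (j + 1) := List.drop_eq_getElem_cons hj
  have hne : (s.drop j).reverse ≠ [] := by
    rw [hdrop]; simp; exact hj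
  obtain ⟨v, hv⟩ : ∃ v, PySem.List.min? ((s.drop j).reverse) (fun x => x) = some v := by
    cases h : PySem.List.min? ((s.drop j).reverse) (fun x => x) with
    | none => exact absurd ((PySem.List.min?_eq_none_iff _ _).mp h) hne
    | some v => exact ⟨v, rfl⟩
  have hmem : v ∈ s.drop j := by
    have := PySem.List.min?_mem hv
    simpa using this
  have hmin : s[j] ≤ v := by
    have hpw : (s.drop j).Pairwise (· ≤ ·) := hs.sublist (List.drop_sublist j s)
    rw [hdrop] at hpw hmem
    rcases List.mem_cons.mp hmem with h | h
    · omega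
    · exact (List.pairwise_cons.mp hpw).1 v h
  have hle : v ≤ s[j] := by
    have := PySem.List.min?_isMin hv s[j] (by rw [List.mem_reverse, hdrop]; exact List.mem_cons_self)
    simpa using this
  rw [hv]
  congr 1
  omega

-- peeling the last group of m off B's strided index range
lemma pyRange_mod_split (n m : Int) (hm : 0 < m) (hmn : m ≤ n) :
    PySem.List.pyRange (PySem.Int.mod n m) n m
      = PySem.List.pyRange (PySem.Int.mod (n - m) m) (n - m) m ++ [n - m] := by
  have hr : PySem.Int.mod n m = n % m := PySem.Int.mod_eq_emod_of_pos hm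
  have hr' : PySem.Int.mod (n - m) m = n % m := by
    rw [PySem.Int.mod_eq_emod_of_pos hm, Int.sub_emod_right]
  set r := n % m with hrdef
  have hr0 : 0 ≤ r := Int.emod_nonneg n (by omega)
  have hrm : r < m := Int.emod_lt_of_pos n hm
  set q := n / m with hqdef
  have hid : r + m * q = n := Int.emod_add_mul_ediv n m
  have hq1 : 1 ≤ q := (Int.le_ediv_iff_mul_le hm).mpr (by omega)
  have hcnt : (n - r + m - 1) / m = q := by
    rw [show n - r + m - 1 = m - 1 + (m * q) by omega, Int.mul_comm,
        Int.add_mul_ediv_right _ _ (by omega : m ≠ 0),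
        Int.ediv_eq_zero_of_lt (by omega) (by omega)]
    ring
  rw [hr, hr', PySem.List.pyRange_of_pos r n hm, PySem.List.pyRange_of_pos r (n - m) hm]
  by_cases hcase : r < n - m
  · have hcnt2 : (n - m - r + m - 1) / m = q - 1 := by
      rw [show n - m - r + m - 1 = m - 1 + (m * (q - 1)) by ring_nf; omega, Int.mul_comm,
          Int.add_mul_ediv_right _ _ (by omega : m ≠ 0),
          Int.ediv_eq_zero_of_lt (by omega) (by omega)]
      ring
    rw [if_pos (by omega), if_pos hcase, hcnt, hcnt2]
    have hqn : q.toNat = (q - 1).toNat + 1 := by omega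
    rw [hqn, List.range_succ, List.map_append]
    simp only [List.map_cons, List.map_nil]
    congr 2
    have : ((q - 1).toNat : Int) = q - 1 := by omega
    rw [this]
    linear_combination hid
  · -- q = 1: left range is [r] = [n - m], right range is empty
    have hq : q = 1 := by nlinarith
    rw [if_pos (by omega), if_neg hcase, hcnt, hq]
    simp
    linear_combination hid - hq * m

lemma bsum_step (m : Int) (s : List Int) (hm : 1 ≤ m) (h : m.toNat ≤ s.length) :
    bsum m s = bsum m (s.take (s.length - m.toNat))
      + (PySem.List.pyGet? s ((s.length : Int) - m)).getD 0 * m := by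
  have hlen : (s.take (s.length - m.toNat)).length = s.length - m.toNat := by simp
  have hcast : (((s.length - m.toNat : Nat)) : Int) = (s.length : Int) - m := by omega
  unfold bsum
  rw [pyRange_mod_split (s.length : Int) m (by omega) (by omega), List.map_append,
      List.sum_append, hlen, hcast]
  refine congrArg₂ (· + ·) (congrArg List.sum ?_) (by simp)
  apply List.map_congr_left
  intro i hi
  rw [PySem.List.mem_pyRange_iff_of_pos (by omega)] at hi
  have h0 : 0 ≤ i := le_trans (PySem.Int.mod_nonneg _ (by omega)) hi.1
  rw [PySem.List.pyGet?_of_nonneg _ h0, PySem.List.pyGet?_of_nonneg _ h0,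
      List.getElem?_take, if_pos (by omega)]

lemma bsum_small (m : Int) (s : List Int) (hm : 1 ≤ m) (h : (s.length : Int) < m) :
    bsum m s = 0 := by
  unfold bsum
  rw [PySem.Int.mod_eq_emod_of_pos (by omega),
      Int.emod_eq_of_lt (by positivity) h,
      PySem.List.pyRange_of_pos _ _ (by omega), if_neg (by omega)]
  simp

lemma loop_eq_bsum (m : Int) (hm : 1 ≤ m) :
    ∀ (fuel : Nat) (s : List Int) (ans : Int), s.length < fuel → s.Pairwise (· ≤ ·) →
    solutionLoop fuel m s ans = ans + bsum m s := by
  intro fuel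
  induction fuel with
  | zero => intro s ans h _; omega
  | succ fuel ih =>
    intro s ans hlen hs
    set t := m.toNat with htdef
    have hmt : (t : Int) = m := by omega
    by_cases hcond : m ≤ (s.length : Int)
    · have ht : t ≤ s.length := by omega
      have hj : s.length - t < s.length := by omega
      rw [solutionLoop, if_pos hcond]
      rw [show PySem.List.pyRange 0 m 1 = PySem.List.pyRange 0 (t : Int) 1 by rw [hmt]]
      simp only [innerFold t s [] ht, List.nil_append]
      rw [min_drop_reverse s (s.length - t) hs hj]
      simp only [Option.getD_some, List.length_reverse, List.length_drop]
      rw [show s.length - (s.length - t) = t by omega]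
      rw [ih _ _ (by simp; omega) (hs.sublist (List.take_sublist _ _))]
      rw [bsum_step m s hm ht]
      have hget : (PySem.List.pyGet? s ((s.length : Int) - m)).getD 0 = s[s.length - t] := by
        rw [PySem.List.pyGet?_of_nonneg _ (by omega),
            show ((s.length : Int) - m).toNat = s.length - t by omega,
            List.getElem?_eq_getElem hj]
        rfl
      rw [hget, hmt]
      ring
    · rw [solutionLoop, if_neg hcond, bsum_small m s hm (by omega)]
      ring

-- ===== VERDICT (by name: the statement is the Claim_ definition above) =====
theorem solution_spec : Claim_equal_solution := by
  intro k m score _ hpre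
  unfold Spec_solution solution solution_alt
  rw [loop_eq_bsum m hpre _ _ _ (by simp [PySem.List.length_sorted])
      (PySem.List.sorted_pairwise score (fun x => x))]
  rw [PySem.List.foldl_add]
  rfl
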